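-- pv_equiv track=rewrite | github.com/alanyoungcy/marksix | lotteryOptimize.py | check_furedi_lower_bound
-- ===== SOURCE A (Python) =====
-- import itertools
--
-- def check_furedi_lower_bound(n: int, k: int, p: int, lb: int) -> bool:
--     """Check Füredi lower bound conditions."""
--     llb = k * lb
--     np = p - 1
--
--     for combination in itertools.combinations_with_replacement(range(1, n + 1), np):
--         if sum(combination) == n:
--             ws = []
--             for x in combination:
--                 if (x - 1) % (k - 1) == 0:
--                     ws.append(x * ((x - 1) // (k - 1)))
--                 else:
--                     ws.append(x * (1 + ((x - 1) // (k - 1))))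
--             if sum(ws) <= llb:
--                 return True
--     return False
-- ===== SOURCE B (Python) =====
-- def check_furedi_lower_bound(n: int, k: int, p: int, lb: int) -> bool:
--     """DP over (number of parts, excess over the all-ones partition) tracking minimum total weight."""
--     llb = k * lb
--     m = p - 1
--     if m == 0:
--         return n == 0 and 0 <= llb
--     if m < 0 or n < m:
--         return False
--     E = n - m  # excess to spread over at most min(m, E) parts larger than 1
--     W = []
--     for x in range(E + 2):
--         q, r = divmod(x - 1, k - 1)
--         W.append(x * (q + (1 if r != 0 else 0)))
--     row = [W[e + 1] for e in range(E + 1)]  # row[e] = min weight of exactly 1 part with excess e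
--     if row[E] <= llb:
--         return True
--     jmax = min(m, E)
--     j = 2
--     while j <= jmax:
--         # minimum weight of exactly j parts (sizes >= 1) with total excess E
--         top = row[E] + W[1]
--         for x in range(2, E + 2):
--             c = row[E - x + 1] + W[x]
--             if c < top:
--                 top = c
--         if top <= llb:
--             return True
--         if j < jmax:
--             nrow = []
--             for e in range(E + 1):
--                 best = row[e] + W[1]
--                 for x in range(2, e + 2):
--                     c = row[e - x + 1] + W[x]
--                     if c < best:
--                         best = c
--                 nrow.append(best)
--             row = nrow
--         j += 1
--     return False
-- ===== Notes on version B (the rewrite author's own statement) =====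
-- stated objective: faster
-- what changed: Replaces A's exponential scan of all combinations_with_replacement multisets by an O(p*n^2) dynamic program over (number of parts, sum) that tracks the minimum total weight and compares it once against k*lb.
import Mathlib
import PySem

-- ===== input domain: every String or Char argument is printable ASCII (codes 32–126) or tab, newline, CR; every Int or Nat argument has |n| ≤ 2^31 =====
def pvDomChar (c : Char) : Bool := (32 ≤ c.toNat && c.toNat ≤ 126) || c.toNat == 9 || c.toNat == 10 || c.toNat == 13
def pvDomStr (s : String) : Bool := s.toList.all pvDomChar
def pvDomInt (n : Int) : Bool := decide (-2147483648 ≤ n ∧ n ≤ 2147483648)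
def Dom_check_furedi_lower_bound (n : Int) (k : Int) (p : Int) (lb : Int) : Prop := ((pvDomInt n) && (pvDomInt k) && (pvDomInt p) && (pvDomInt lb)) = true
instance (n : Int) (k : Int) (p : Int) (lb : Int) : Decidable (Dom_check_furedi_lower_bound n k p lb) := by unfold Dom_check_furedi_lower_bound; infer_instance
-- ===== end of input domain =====

-- B replaces A's exponential enumeration of all multisets by a dynamic program over
-- (number of parts larger than one, excess over the all-ones partition) tracking the
-- minimum total weight, accepting as soon as one round's minimum fits (objective: faster).

-- ===== PORT A =====

-- the weight A appends for one part x (Python's % and // on possibly negative values)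
def pvWeightA (k : Int) (x : Int) : Int :=
  if PySem.Int.mod (x - 1) (k - 1) = 0 then x * (PySem.Int.floordiv (x - 1) (k - 1))
  else x * (1 + PySem.Int.floordiv (x - 1) (k - 1))

-- itertools.combinations_with_replacement(range(lo, hi+1), r): nondecreasing tuples, lex order
def pvCombs (hi : Int) : Nat → Int → List (List Int)
  | 0, _ => [[]]
  | r + 1, lo => (PySem.List.pyRange lo (hi + 1) 1).flatMap
      (fun x => (pvCombs hi r x).map (fun c => x :: c))

def check_furedi_lower_bound (n : Int) (k : Int) (p : Int) (lb : Int) : Bool :=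
  let llb := k * lb
  -- Python raises ValueError when p - 1 < 0; that case is outside Pre_ (toNat is exact on it)
  let np := (p - 1).toNat
  (pvCombs n np 1).any (fun c =>
    decide (c.sum = n) && decide ((c.map (pvWeightA k)).sum ≤ llb))

-- ===== PORT B =====

-- q, r = divmod(x - 1, k - 1); x * (q + (1 if r != 0 else 0))
def pvWeightB (k : Int) (x : Int) : Int :=
  x * (PySem.Int.floordiv (x - 1) (k - 1) +
    (if PySem.Int.mod (x - 1) (k - 1) ≠ 0 then 1 else 0))

-- W: weight of a part of size x, for x in 0..E+1
def pvWTable (k E : Int) : List Int :=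
  (PySem.List.pyRange 0 (E + 2) 1).map (pvWeightB k)

-- row for j = 1: one part with excess e has weight W[e+1]
def pvRowOne (E : Int) (W : List Int) : List Int :=
  (PySem.List.pyRange 0 (E + 1) 1).map (fun e => PySem.List.pyGetD W (e + 1) 0)

-- inner loop: minimum over the size x of one more part of row[e-x+1] + W[x]
def pvEntry (W row : List Int) (e : Int) : Int :=
  (PySem.List.pyRange 2 (e + 2) 1).foldl
    (fun best x =>
      let c := PySem.List.pyGetD row (e - x + 1) 0 + PySem.List.pyGetD W x 0
      if c < best then c else best)
    (PySem.List.pyGetD row e 0 + PySem.List.pyGetD W 1 0)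

def pvNextRow (E : Int) (W row : List Int) : List Int :=
  (PySem.List.pyRange 0 (E + 1) 1).map (pvEntry W row)

-- while j <= jmax: accept early, build the next row only when another round follows
def pvLoop (E llb jmax : Int) (W : List Int) : Nat → Int → List Int → Bool
  | 0, _, _ => false
  | fuel + 1, j, row =>
    if pvEntry W row E ≤ llb then true
    else if j < jmax then pvLoop E llb jmax W fuel (j + 1) (pvNextRow E W row)
    else pvLoop E llb jmax W fuel (j + 1) row

def check_furedi_lower_bound_alt (n : Int) (k : Int) (p : Int) (lb : Int) : Bool :=
  if p - 1 = 0 then decide (n = 0) && decide ((0 : Int) ≤ k * lb)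
  else if p - 1 < 0 ∨ n < p - 1 then false
  else
    if PySem.List.pyGetD (pvRowOne (n - (p - 1)) (pvWTable k (n - (p - 1)))) (n - (p - 1)) 0
        ≤ k * lb then true
    else
      pvLoop (n - (p - 1)) (k * lb) (min (p - 1) (n - (p - 1))) (pvWTable k (n - (p - 1)))
        (min (p - 1) (n - (p - 1)) - 1).toNat 2
        (pvRowOne (n - (p - 1)) (pvWTable k (n - (p - 1))))

-- ===== PRECONDITION & SPEC =====
-- Pre_ excludes exactly the inputs on which the Python A raises: p < 1 (ValueError from
-- combinations_with_replacement with negative r) and k = 1 with 1 ≤ p - 1 ≤ n (a combination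
-- summing to n is always reached and the weight computation divides by k - 1 = 0).
def Pre_check_furedi_lower_bound (n : Int) (k : Int) (p : Int) (lb : Int) : Prop :=
  1 ≤ p ∧ (k = 1 → p = 1 ∨ n < p - 1)
instance (n : Int) (k : Int) (p : Int) (lb : Int) : Decidable (Pre_check_furedi_lower_bound n k p lb) := by
  unfold Pre_check_furedi_lower_bound; infer_instance

def pvWitness_check_furedi_lower_bound : Int × Int × Int × Int := (6, 3, 4, 2)

def Spec_check_furedi_lower_bound (n : Int) (k : Int) (p : Int) (lb : Int) (out : Bool) : Prop := out = check_furedi_lower_bound_alt n k p lb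
instance (n : Int) (k : Int) (p : Int) (lb : Int) (out : Bool) : Decidable (Spec_check_furedi_lower_bound n k p lb out) := by unfold Spec_check_furedi_lower_bound; infer_instance

-- ===== CLAIM (what is proved, stated in full; the proofs are below) =====
def Claim_equal_check_furedi_lower_bound : Prop := ∀ (n : Int) (k : Int) (p : Int) (lb : Int), Dom_check_furedi_lower_bound n k p lb → Pre_check_furedi_lower_bound n k p lb → Spec_check_furedi_lower_bound n k p lb (check_furedi_lower_bound n k p lb)

-- ===== LEMMAS AND PROOFS =====

-- the two weight formulas agree
theorem pvWeight_eq (k x : Int) : pvWeightB k x = pvWeightA k x := by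
  unfold pvWeightA pvWeightB
  by_cases h : PySem.Int.mod (x - 1) (k - 1) = 0
  · rw [if_pos h, if_neg (not_not_intro h)]
    ring
  · rw [if_neg h, if_pos h]
    ring

theorem pvWeightB_one (k : Int) : pvWeightB k 1 = 0 := by
  norm_num [pvWeightB, PySem.Int.floordiv, PySem.Int.mod]

-- minimum-combiner mirroring the DP's inner loop on optional values
def pvMin2 (best : Option Int) (cand : Option Int) : Option Int :=
  match cand with
  | none => best
  | some c =>
    match best with
    | none => some c
    | some b => if c < b then some c else some b

theorem pvMin2_none_some (c : Int) : pvMin2 none (some c) = some c := rfl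

theorem pvMin2_eq_none_iff (b c : Option Int) : pvMin2 b c = none ↔ b = none ∧ c = none := by
  cases b <;> cases c <;> simp [pvMin2]
  split <;> simp

theorem pvMin2_some_cases {b c : Option Int} {v : Int} (h : pvMin2 b c = some v) :
    b = some v ∨ c = some v := by
  cases b with
  | none =>
    cases c with
    | none => simp [pvMin2] at h
    | some c' => exact Or.inr h
  | some b' =>
    cases c with
    | none => exact Or.inl h
    | some c' =>
      by_cases hlt : c' < b'
      · simp only [pvMin2, if_pos hlt, Option.some.injEq] at h
        exact Or.inr (by rw [h])
      · simp only [pvMin2, if_neg hlt, Option.some.injEq] at h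
        exact Or.inl (by rw [h])

theorem pvMin2_left_le (w : Int) (c : Option Int) :
    ∃ m, pvMin2 (some w) c = some m ∧ m ≤ w := by
  cases c with
  | none => exact ⟨w, rfl, le_refl w⟩
  | some c' =>
    by_cases h : c' < w
    · exact ⟨c', by simp [pvMin2, h], by omega⟩
    · exact ⟨w, by simp [pvMin2, h], le_refl w⟩

theorem pvMin2_right_le (b : Option Int) (c : Int) :
    ∃ m, pvMin2 b (some c) = some m ∧ m ≤ c := by
  cases b with
  | none => exact ⟨c, rfl, le_refl c⟩
  | some b' =>
    by_cases h : c < b'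
    · exact ⟨c, by simp [pvMin2, h], le_refl c⟩
    · exact ⟨b', by simp [pvMin2, h], by omega⟩

-- recursive specification: pvM k j s = minimum total weight of j parts (each ≥ 1) summing to s
def pvM (k : Int) : Nat → Int → Option Int
  | 0, s => if s = 0 then some 0 else none
  | j + 1, s => (PySem.List.pyRange 1 (s + 1) 1).foldl
      (fun best x => pvMin2 best ((pvM k j (s - x)).map (fun u => u + pvWeightB k x))) none

theorem foldMin_spec (f : Int → Option Int) :
    ∀ (l : List Int) (b : Option Int),
      ((l.foldl (fun acc y => pvMin2 acc (f y)) b = none) → (b = none ∧ ∀ x ∈ l, f x = none)) ∧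
      (∀ v, l.foldl (fun acc y => pvMin2 acc (f y)) b = some v →
          (b = some v ∨ ∃ x ∈ l, f x = some v) ∧
          (∀ w, b = some w → v ≤ w) ∧
          (∀ x ∈ l, ∀ c, f x = some c → v ≤ c)) := by
  intro l
  induction l with
  | nil =>
    intro b
    refine ⟨fun h => ⟨by simpa using h, by simp⟩, ?_⟩
    intro v h
    simp only [List.foldl_nil] at h
    refine ⟨Or.inl h, ?_, by simp⟩
    intro w hw
    rw [h] at hw
    injection hw with h'
    omega
  | cons a t ih =>
    intro b
    constructor
    · intro h
      simp only [List.foldl_cons] at h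
      obtain ⟨h1, h2⟩ := (ih (pvMin2 b (f a))).1 h
      obtain ⟨hb, hfa⟩ := (pvMin2_eq_none_iff b (f a)).1 h1
      refine ⟨hb, ?_⟩
      intro x hx
      rcases List.mem_cons.mp hx with rfl | hx
      · exact hfa
      · exact h2 x hx
    · intro v h
      simp only [List.foldl_cons] at h
      obtain ⟨hmem, hbnd, htail⟩ := (ih (pvMin2 b (f a))).2 v h
      refine ⟨?_, ?_, ?_⟩
      · rcases hmem with hm | ⟨x, hx, hfx⟩
        · rcases pvMin2_some_cases hm with hb | hfa
          · exact Or.inl hb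
          · exact Or.inr ⟨a, by simp, hfa⟩
        · exact Or.inr ⟨x, by simp [hx], hfx⟩
      · intro w hw
        subst hw
        obtain ⟨m, hm, hmw⟩ := pvMin2_left_le w (f a)
        have := hbnd m hm
        omega
      · intro x hx c hc
        rcases List.mem_cons.mp hx with rfl | hx
        · obtain ⟨m, hm, hmc⟩ := pvMin2_right_le b c
          rw [← hc] at hm
          have := hbnd m hm
          omega
        · exact htail x hx c hc

theorem foldMin_reach {f : Int → Option Int} {l : List Int} {x c : Int}
    (hx : x ∈ l) (hc : f x = some c) :
    ∃ v, l.foldl (fun acc y => pvMin2 acc (f y)) none = some v ∧ v ≤ c := by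
  rcases h : l.foldl (fun acc y => pvMin2 acc (f y)) none with _ | v
  · have := (foldMin_spec f l none).1 h
    rw [this.2 x hx] at hc
    cases hc
  · exact ⟨v, rfl, ((foldMin_spec f l none).2 v h).2.2 x hx c hc⟩

theorem foldMin_realize {f : Int → Option Int} {l : List Int} {v : Int}
    (h : l.foldl (fun acc y => pvMin2 acc (f y)) none = some v) :
    ∃ x ∈ l, f x = some v := by
  rcases ((foldMin_spec f l none).2 v h).1 with h' | h'
  · cases h'
  · exact h'

theorem foldMin_all_none (f : Int → Option Int) :
    ∀ (l : List Int) (b : Option Int), (∀ x ∈ l, f x = none) →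
      l.foldl (fun acc y => pvMin2 acc (f y)) b = b := by
  intro l
  induction l with
  | nil => intro b _; rfl
  | cons a t ih =>
    intro b h
    simp only [List.foldl_cons]
    rw [h a (by simp)]
    exact ih b (fun x hx => h x (by simp [hx]))

theorem foldMin_somes (g : Int → Int) :
    ∀ (l : List Int) (b : Int),
      l.foldl (fun acc y => pvMin2 acc (some (g y))) (some b)
        = some (l.foldl (fun acc y => if g y < acc then g y else acc) b) := by
  intro l
  induction l with
  | nil => intro b; rfl
  | cons a t ih =>
    intro b
    simp only [List.foldl_cons]
    by_cases h : g a < b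
    · rw [show pvMin2 (some b) (some (g a)) = some (g a) by simp [pvMin2, h], ih, if_pos h]
    · rw [show pvMin2 (some b) (some (g a)) = some b by simp [pvMin2, h], ih, if_neg h]

theorem list_sum_nonneg_of_one_le {c : List Int} (h : ∀ x ∈ c, 1 ≤ x) : 0 ≤ c.sum :=
  List.sum_nonneg (fun x hx => le_trans (by omega) (h x hx))

theorem list_length_le_sum {c : List Int} (h : ∀ x ∈ c, 1 ≤ x) : (c.length : Int) ≤ c.sum := by
  induction c with
  | nil => simp
  | cons a t ih =>
    have ha := h a (by simp)
    have ht := ih (fun x hx => h x (by simp [hx]))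
    simp only [List.length_cons, List.sum_cons]
    push_cast
    omega

theorem list_two_mul_length_le_sum {c : List Int} (h : ∀ x ∈ c, 2 ≤ x) :
    2 * (c.length : Int) ≤ c.sum := by
  induction c with
  | nil => simp
  | cons a t ih =>
    have ha := h a (by simp)
    have ht := ih (fun x hx => h x (by simp [hx]))
    simp only [List.length_cons, List.sum_cons]
    push_cast
    omega

theorem list_sum_all_one {c : List Int} (h : ∀ x ∈ c, x = 1) : c.sum = (c.length : Int) := by
  induction c with
  | nil => simp
  | cons a t ih =>
    have ha := h a (by simp)
    have ht := ih (fun x hx => h x (by simp [hx]))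
    simp only [List.length_cons, List.sum_cons, ha, ht]
    push_cast
    omega

theorem list_elem_le_sum {c : List Int} (h : ∀ x ∈ c, 1 ≤ x) : ∀ x ∈ c, x ≤ c.sum := by
  induction c with
  | nil => simp
  | cons a t ih =>
    intro x hx
    have ht0 : 0 ≤ t.sum := list_sum_nonneg_of_one_le (fun y hy => h y (by simp [hy]))
    have ha := h a (by simp)
    rcases List.mem_cons.mp hx with rfl | hx
    · simp only [List.sum_cons]; omega
    · have := ih (fun y hy => h y (by simp [hy])) x hx
      simp only [List.sum_cons]; omega

-- reachability: every list of j parts ≥ 1 summing to s gives an upper bound on pvM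
theorem pvM_reach (k : Int) (c : List Int) (h1 : ∀ x ∈ c, 1 ≤ x) :
    ∃ v, pvM k c.length c.sum = some v ∧ v ≤ (c.map (pvWeightB k)).sum := by
  induction c with
  | nil => exact ⟨0, by simp [pvM], by simp⟩
  | cons a t ih =>
    obtain ⟨v, hv, hle⟩ := ih (fun x hx => h1 x (by simp [hx]))
    have ha : 1 ≤ a := h1 a (by simp)
    have hts : 0 ≤ t.sum := list_sum_nonneg_of_one_le (fun x hx => h1 x (by simp [hx]))
    have hmem : a ∈ PySem.List.pyRange 1 ((a :: t).sum + 1) 1 := by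
      rw [PySem.List.mem_pyRange_one]
      simp only [List.sum_cons]
      omega
    have hfa : ((pvM k t.length ((a :: t).sum - a)).map (fun u => u + pvWeightB k a))
        = some (v + pvWeightB k a) := by
      have hst : (a :: t).sum - a = t.sum := by simp [List.sum_cons]
      rw [hst, hv]
      rfl
    obtain ⟨m, hm, hmle⟩ := foldMin_reach
      (f := fun x => (pvM k t.length ((a :: t).sum - x)).map (fun u => u + pvWeightB k x))
      hmem hfa
    refine ⟨m, ?_, ?_⟩
    · show pvM k (a :: t).length (a :: t).sum = some m
      simp only [List.length_cons, pvM]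
      exact hm
    · simp only [List.map_cons, List.sum_cons]
      omega

-- realizability: a value of pvM is attained by a concrete list of parts
theorem pvM_realize (k : Int) : ∀ (j : Nat) (s v : Int), pvM k j s = some v →
    ∃ c : List Int, c.length = j ∧ (∀ x ∈ c, 1 ≤ x) ∧ c.sum = s ∧ (c.map (pvWeightB k)).sum = v := by
  intro j
  induction j with
  | zero =>
    intro s v h
    simp only [pvM] at h
    by_cases hs : s = 0
    · rw [if_pos hs] at h
      injection h with hv
      exact ⟨[], rfl, by simp, by simp [hs], by simp [← hv]⟩
    · rw [if_neg hs] at h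
      cases h
  | succ j ih =>
    intro s v h
    simp only [pvM] at h
    obtain ⟨x, hx, hfx⟩ := foldMin_realize
      (f := fun x => (pvM k j (s - x)).map (fun u => u + pvWeightB k x)) h
    rw [PySem.List.mem_pyRange_one] at hx
    rcases hpm : pvM k j (s - x) with _ | v'
    · rw [hpm] at hfx; cases hfx
    · rw [hpm] at hfx
      simp only [Option.map_some, Option.some.injEq] at hfx
      obtain ⟨c, hlen, hone, hsum, hw⟩ := ih (s - x) v' hpm
      refine ⟨x :: c, by simp [hlen], ?_, ?_, ?_⟩
      · intro y hy
        rcases List.mem_cons.mp hy with rfl | hy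
        · omega
        · exact hone y hy
      · simp only [List.sum_cons]; omega
      · simp only [List.map_cons, List.sum_cons]; omega

-- pvM is none below the all-ones sum
theorem pvM_none_of_lt (k : Int) : ∀ (j : Nat) (s : Int), s < (j : Int) → pvM k j s = none := by
  intro j
  induction j with
  | zero =>
    intro s hs
    simp only [pvM]
    rw [if_neg (by omega)]
  | succ j ih =>
    intro s hs
    simp only [pvM]
    apply foldMin_all_none
    intro x hx
    rw [PySem.List.mem_pyRange_one] at hx
    rw [ih (s - x) (by push_cast at hs ⊢; omega)]
    rfl

-- the minimum for j ≥ 1 parts and excess e ≥ 0 exists; pvV names it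
def pvV (k : Int) (j : Nat) (e : Int) : Int := (pvM k j ((j : Int) + e)).getD 0

theorem pvM_eq_some_pvV (k : Int) (j : Nat) (e : Int) (hj : 1 ≤ j) (he : 0 ≤ e) :
    pvM k j ((j : Int) + e) = some (pvV k j e) := by
  have h1 : ∀ x ∈ (e + 1) :: List.replicate (j - 1) (1 : Int), 1 ≤ x := by
    intro x hx
    rcases List.mem_cons.mp hx with rfl | hx
    · omega
    · rw [List.eq_of_mem_replicate hx]
  obtain ⟨v, hv, -⟩ := pvM_reach k ((e + 1) :: List.replicate (j - 1) (1 : Int)) h1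
  have hlen : ((e + 1) :: List.replicate (j - 1) (1 : Int)).length = j := by
    simp; omega
  have hsum : ((e + 1) :: List.replicate (j - 1) (1 : Int)).sum = (j : Int) + e := by
    simp only [List.sum_cons, List.sum_replicate, nsmul_eq_mul, mul_one]
    have : ((j - 1 : Nat) : Int) = (j : Int) - 1 := by omega
    rw [this]; ring
  rw [hlen, hsum] at hv
  unfold pvV
  rw [hv]
  rfl

theorem pvV_one (k : Int) (e : Int) (he : 0 ≤ e) : pvV k 1 e = pvWeightB k (e + 1) := by
  have hM : pvM k 1 (1 + e) = some (pvWeightB k (1 + e)) := by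
    simp only [pvM]
    have hnone : ∀ x ∈ PySem.List.pyRange 1 (1 + e) 1,
        (Option.map (fun u => u + pvWeightB k x)
          (if 1 + e - x = 0 then some 0 else none)) = none := by
      intro x hx
      rw [PySem.List.mem_pyRange_one] at hx
      rw [if_neg (by omega)]
      rfl
    rw [show (1 : Int) + e + 1 = (1 + e) + 1 by ring,
      PySem.List.pyRange_one_succ_right (show (1 : Int) ≤ 1 + e by omega),
      List.foldl_append,
      foldMin_all_none (fun x => Option.map (fun u => u + pvWeightB k x)
          (if 1 + e - x = 0 then some 0 else none))
        (PySem.List.pyRange 1 (1 + e) 1) none hnone]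
    show pvMin2 none (Option.map (fun u => u + pvWeightB k (1 + e))
        (if 1 + e - (1 + e) = 0 then some 0 else none)) = some (pvWeightB k (1 + e))
    rw [show (1 : Int) + e - (1 + e) = 0 by ring, if_pos rfl, Option.map_some,
      pvMin2_none_some, zero_add]
  unfold pvV
  rw [show ((1 : Nat) : Int) + e = 1 + e by push_cast; ring, hM]
  simp only [Option.getD_some]
  rw [show (1 : Int) + e = e + 1 by ring]

-- the inner loop computes the next row's entry: pvEntry on a correct row for j parts
-- yields the minimum for j + 1 parts
theorem pvEntry_correct (k E : Int) (W row : List Int) (j : Nat)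
    (hW : ∀ x : Int, 0 ≤ x → x ≤ E + 1 → PySem.List.pyGetD W x 0 = pvWeightB k x)
    (hrow : ∀ e : Int, 0 ≤ e → e ≤ E → PySem.List.pyGetD row e 0 = pvV k j e)
    (hj : 1 ≤ j) (e : Int) (he0 : 0 ≤ e) (heE : e ≤ E) :
    pvM k (j + 1) ((j : Int) + 1 + e) = some (pvEntry W row e) := by
  simp only [pvM]
  rw [PySem.List.pyRange_one_append 1 (e + 2) ((j : Int) + 1 + e + 1) (by omega) (by omega),
    List.foldl_append,
    PySem.List.pyRange_one_cons (show (1 : Int) < e + 2 by omega)]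
  rw [show (1 : Int) + 1 = 2 from by norm_num]
  simp only [List.foldl_cons]
  rw [show (j : Int) + 1 + e - 1 = (j : Int) + e by ring,
    pvM_eq_some_pvV k j e hj he0]
  simp only [Option.map_some]
  rw [pvMin2_none_some]
  rw [PySem.List.foldl_congr_mem' (PySem.List.pyRange 2 (e + 2) 1) _
    (fun best x => pvMin2 best (some (pvV k j (e - x + 1) + pvWeightB k x))) _
    (by
      intro x hx best
      rw [PySem.List.mem_pyRange_one] at hx
      rw [show (j : Int) + 1 + e - x = (j : Int) + (e - x + 1) by ring,
        pvM_eq_some_pvV k j (e - x + 1) hj (by omega)]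
      rfl)]
  rw [foldMin_somes (fun x => pvV k j (e - x + 1) + pvWeightB k x)
    (PySem.List.pyRange 2 (e + 2) 1) (pvV k j e + pvWeightB k 1)]
  rw [foldMin_all_none _ (PySem.List.pyRange (e + 2) ((j : Int) + 1 + e + 1) 1) _
    (by
      intro x hx
      rw [PySem.List.mem_pyRange_one] at hx
      rw [pvM_none_of_lt k j ((j : Int) + 1 + e - x) (by omega)]
      rfl)]
  congr 1
  unfold pvEntry
  rw [hrow e he0 heE, hW 1 (by omega) (by omega)]
  refine (PySem.List.foldl_congr_mem' (PySem.List.pyRange 2 (e + 2) 1) _ _ _ ?_).symm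
  intro x hx acc
  rw [PySem.List.mem_pyRange_one] at hx
  rw [hrow (e - x + 1) (by omega) (by omega), hW x (by omega) (by omega)]

-- the early-accepting round loop decides whether any round j..jmax fits under llb
theorem pvLoop_spec (k E llb jmax : Int) (W : List Int) (hE : 0 ≤ E)
    (hW : ∀ x : Int, 0 ≤ x → x ≤ E + 1 → PySem.List.pyGetD W x 0 = pvWeightB k x) :
    ∀ (fuel : Nat) (j : Int) (row : List Int), 2 ≤ j → j + (fuel : Int) = jmax + 1 →
      (∀ e : Int, 0 ≤ e → e ≤ E → PySem.List.pyGetD row e 0 = pvV k (j - 1).toNat e) →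
      (pvLoop E llb jmax W fuel j row = true ↔
        ∃ i : Int, j ≤ i ∧ i ≤ jmax ∧ pvV k i.toNat E ≤ llb) := by
  intro fuel
  induction fuel with
  | zero =>
    intro j row hj harith hrow
    simp only [pvLoop]
    constructor
    · intro h; cases h
    · rintro ⟨i, h1, h2, -⟩
      exfalso
      simp only [Nat.cast_zero] at harith
      omega
  | succ fuel ih =>
    intro j row hj harith hrow
    have hjle : j ≤ jmax := by push_cast at harith; omega
    have hEntryAt : ∀ e : Int, 0 ≤ e → e ≤ E → pvEntry W row e = pvV k j.toNat e := by
      intro e he0 heE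
      have h1 : (1 : Nat) ≤ (j - 1).toNat := by omega
      have hthis := pvEntry_correct k E W row (j - 1).toNat hW hrow h1 e he0 heE
      have h2 : (j - 1).toNat + 1 = j.toNat := by omega
      have h3 : (((j - 1).toNat : Int)) + 1 + e = (j.toNat : Int) + e := by omega
      rw [h2, h3] at hthis
      have h4 := pvM_eq_some_pvV k j.toNat e (by omega) he0
      rw [hthis] at h4
      exact Option.some.inj h4
    have hEntry : pvEntry W row E = pvV k j.toNat E := hEntryAt E hE (le_refl E)
    simp only [pvLoop]
    by_cases htop : pvEntry W row E ≤ llb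
    · rw [if_pos htop]
      constructor
      · intro _
        exact ⟨j, le_refl j, hjle, by rw [← hEntry]; exact htop⟩
      · intro _; rfl
    · rw [if_neg htop]
      by_cases hlt : j < jmax
      · rw [if_pos hlt]
        have hnextrow : ∀ e : Int, 0 ≤ e → e ≤ E →
            PySem.List.pyGetD (pvNextRow E W row) e 0 = pvV k (j + 1 - 1).toNat e := by
          intro e he0 heE
          unfold pvNextRow
          rw [PySem.List.pyGetD_map_pyRange_of_nonneg _ (E + 1) e 0 he0 (by omega)]
          rw [hEntryAt e he0 heE]
          congr 1
          omega
        rw [ih (j + 1) (pvNextRow E W row) (by omega) (by push_cast at harith ⊢; omega) hnextrow]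
        constructor
        · rintro ⟨i, h1, h2, h3⟩
          exact ⟨i, by omega, h2, h3⟩
        · rintro ⟨i, h1, h2, h3⟩
          by_cases hij : i = j
          · exfalso
            apply htop
            rw [hEntry]
            subst hij
            exact h3
          · exact ⟨i, by omega, h2, h3⟩
      · rw [if_neg hlt]
        have hfuel : fuel = 0 := by push_cast at harith; omega
        subst hfuel
        simp only [pvLoop]
        constructor
        · intro h; cases h
        · rintro ⟨i, h1, h2, h3⟩
          exfalso
          apply htop
          rw [hEntry]
          have : i = j := by omega
          subst this
          exact h3

-- bridging: the m-part minimum fits iff some round 1..min(m,E) of the DP fits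
theorem pvV_bridge (k m E llb : Int) (hm : 1 ≤ m) (hE : 0 ≤ E) :
    pvV k m.toNat E ≤ llb ↔
      (pvV k 1 E ≤ llb ∨ ∃ i : Int, 2 ≤ i ∧ i ≤ min m E ∧ pvV k i.toNat E ≤ llb) := by
  constructor
  · intro h
    obtain ⟨c, hlen, h1, hsum, hwsum⟩ :=
      pvM_realize k m.toNat ((m.toNat : Int) + E) (pvV k m.toNat E)
        (pvM_eq_some_pvV k m.toNat E (by omega) hE)
    set cb := c.filter (fun x => decide (x ≠ 1)) with hcb
    set cs := c.filter (fun x => !(decide (x ≠ 1))) with hcs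
    have hperm : (cb ++ cs).Perm c := List.filter_append_perm _ c
    have hb2 : ∀ x ∈ cb, 2 ≤ x := by
      intro x hx
      obtain ⟨hxc, hxp⟩ := List.mem_filter.mp hx
      have := h1 x hxc
      have : x ≠ 1 := by simpa using hxp
      omega
    have hs1 : ∀ x ∈ cs, x = 1 := by
      intro x hx
      obtain ⟨hxc, hxp⟩ := List.mem_filter.mp hx
      simpa using hxp
    have hsum2 : cb.sum + cs.sum = (m.toNat : Int) + E := by
      rw [← List.sum_append, hperm.sum_eq, hsum]
    have hlen2 : cb.length + cs.length = m.toNat := by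
      rw [← List.length_append, hperm.length_eq, hlen]
    have hcssum : cs.sum = (cs.length : Int) := list_sum_all_one hs1
    have hwsplit : (cb.map (pvWeightB k)).sum + (cs.map (pvWeightB k)).sum
        = pvV k m.toNat E := by
      rw [← List.sum_append, ← List.map_append, (hperm.map (pvWeightB k)).sum_eq, hwsum]
    have hwcs : (cs.map (pvWeightB k)).sum = 0 := by
      apply List.sum_eq_zero
      intro y hy
      obtain ⟨x, hx, rfl⟩ := List.mem_map.mp hy
      rw [hs1 x hx, pvWeightB_one]
    have hwcb : (cb.map (pvWeightB k)).sum = pvV k m.toNat E := by omega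
    have hcbsum : cb.sum = E + (cb.length : Int) := by omega
    have h2len : 2 * (cb.length : Int) ≤ cb.sum := list_two_mul_length_le_sum hb2
    have hlbE : (cb.length : Int) ≤ E := by omega
    by_cases hlb0 : cb.length = 0
    · left
      have hcbnil : cb = [] := List.eq_nil_of_length_eq_zero hlb0
      have hE0 : E = 0 := by
        rw [hcbnil] at hcbsum
        simp at hcbsum
        omega
      have hV0 : pvV k m.toNat E = 0 := by
        rw [← hwcb, hcbnil]
        simp
      have h0llb : (0 : Int) ≤ llb := by
        rw [hV0] at h
        exact h
      rw [pvV_one k E hE, hE0]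
      norm_num [pvWeightB_one]
      exact h0llb
    · obtain ⟨v, hv, hvle⟩ := pvM_reach k cb (fun x hx => by have := hb2 x hx; omega)
      rw [hcbsum, show E + (cb.length : Int) = (cb.length : Int) + E by ring] at hv
      have hveq := pvM_eq_some_pvV k cb.length E (by omega) hE
      rw [hv] at hveq
      have hvv : v = pvV k cb.length E := Option.some.inj hveq
      have hfit : pvV k cb.length E ≤ llb := by
        rw [← hvv]
        omega
      by_cases hlb1 : cb.length = 1
      · left
        rw [← hlb1]
        exact hfit
      · right
        refine ⟨(cb.length : Int), by omega, ?_, ?_⟩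
        · have : (cb.length : Int) ≤ m := by omega
          exact le_min this hlbE
        · rw [Int.toNat_natCast]
          exact hfit
  · intro h
    rcases h with h | ⟨i, h2i, hiMin, hVi⟩
    · -- pad a single part of size E + 1 with m - 1 ones
      have hone : ∀ x ∈ (E + 1) :: List.replicate (m.toNat - 1) (1 : Int), 1 ≤ x := by
        intro x hx
        rcases List.mem_cons.mp hx with rfl | hx
        · omega
        · rw [List.eq_of_mem_replicate hx]
      obtain ⟨v, hv, hvle⟩ := pvM_reach k ((E + 1) :: List.replicate (m.toNat - 1) (1 : Int)) hone
      have hlen : ((E + 1) :: List.replicate (m.toNat - 1) (1 : Int)).length = m.toNat := by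
        simp; omega
      have hsum : ((E + 1) :: List.replicate (m.toNat - 1) (1 : Int)).sum
          = (m.toNat : Int) + E := by
        simp only [List.sum_cons, List.sum_replicate, nsmul_eq_mul, mul_one]
        omega
      have hwsum : (((E + 1) :: List.replicate (m.toNat - 1) (1 : Int)).map (pvWeightB k)).sum
          = pvWeightB k (E + 1) := by
        simp only [List.map_cons, List.sum_cons, List.map_replicate, pvWeightB_one,
          List.sum_replicate, smul_zero, add_zero]
      rw [hlen, hsum] at hv
      have hveq := pvM_eq_some_pvV k m.toNat E (by omega) hE
      rw [hv] at hveq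
      rw [← Option.some.inj hveq]
      rw [hwsum] at hvle
      rw [pvV_one k E hE] at h
      omega
    · -- pad a minimal i-part configuration with m - i ones
      have hi1 : 1 ≤ i.toNat := by omega
      have him : i ≤ m := le_trans hiMin (min_le_left m E)
      obtain ⟨c', hlen', h1', hsum', hwsum'⟩ :=
        pvM_realize k i.toNat ((i.toNat : Int) + E) (pvV k i.toNat E)
          (pvM_eq_some_pvV k i.toNat E hi1 hE)
      have hone : ∀ x ∈ c' ++ List.replicate (m.toNat - i.toNat) (1 : Int), 1 ≤ x := by
        intro x hx
        rcases List.mem_append.mp hx with hx | hx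
        · exact h1' x hx
        · rw [List.eq_of_mem_replicate hx]
      obtain ⟨v, hv, hvle⟩ := pvM_reach k (c' ++ List.replicate (m.toNat - i.toNat) (1 : Int)) hone
      have hlen : (c' ++ List.replicate (m.toNat - i.toNat) (1 : Int)).length = m.toNat := by
        simp [hlen']; omega
      have hsum : (c' ++ List.replicate (m.toNat - i.toNat) (1 : Int)).sum
          = (m.toNat : Int) + E := by
        simp only [List.sum_append, List.sum_replicate, nsmul_eq_mul, mul_one, hsum']
        omega
      have hwsum : ((c' ++ List.replicate (m.toNat - i.toNat) (1 : Int)).map (pvWeightB k)).sum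
          = pvV k i.toNat E := by
        simp only [List.map_append, List.sum_append, List.map_replicate, pvWeightB_one,
          List.sum_replicate, smul_zero, add_zero, hwsum']
      rw [hlen, hsum] at hv
      have hveq := pvM_eq_some_pvV k m.toNat E (by omega) hE
      rw [hv] at hveq
      rw [← Option.some.inj hveq]
      rw [hwsum] at hvle
      omega

-- membership in pvCombs: nondecreasing tuples with entries in [lo, hi]
theorem mem_pvCombs (hi : Int) : ∀ (r : Nat) (lo : Int) (c : List Int),
    c ∈ pvCombs hi r lo ↔
      c.length = r ∧ List.Pairwise (· ≤ ·) c ∧ ∀ x ∈ c, lo ≤ x ∧ x ≤ hi := by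
  intro r
  induction r with
  | zero =>
    intro lo c
    simp only [pvCombs, List.mem_singleton]
    constructor
    · rintro rfl; simp
    · rintro ⟨h, -, -⟩
      exact List.eq_nil_of_length_eq_zero h
  | succ r ih =>
    intro lo c
    simp only [pvCombs, List.mem_flatMap, List.mem_map]
    constructor
    · rintro ⟨x, hx, c', hc', rfl⟩
      rw [PySem.List.mem_pyRange_one] at hx
      obtain ⟨hlen, hpw, hbd⟩ := (ih x c').1 hc'
      refine ⟨by simp [hlen], ?_, ?_⟩
      · rw [List.pairwise_cons]
        exact ⟨fun y hy => (hbd y hy).1, hpw⟩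
      · intro y hy
        rcases List.mem_cons.mp hy with rfl | hy
        · omega
        · have := hbd y hy; omega
    · rintro ⟨hlen, hpw, hbd⟩
      rcases c with _ | ⟨a, t⟩
      · simp at hlen
      · rw [List.pairwise_cons] at hpw
        have hab := hbd a (by simp)
        refine ⟨a, ?_, t, ?_, rfl⟩
        · rw [PySem.List.mem_pyRange_one]; omega
        · exact (ih a t).2 ⟨by simpa using hlen, hpw.2,
            fun y hy => ⟨hpw.1 y hy, (hbd y (by simp [hy])).2⟩⟩

-- A's loop as an existence statement
theorem portA_eq_true_iff (n k p lb : Int) :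
    check_furedi_lower_bound n k p lb = true ↔
      ∃ c ∈ pvCombs n (p - 1).toNat 1, c.sum = n ∧ (c.map (pvWeightA k)).sum ≤ k * lb := by
  unfold check_furedi_lower_bound
  simp [List.any_eq_true]

-- A decides exactly whether the m-part minimum fits
theorem portA_iff_V (n k p lb : Int) (hm : 1 ≤ p - 1) (hnm : p - 1 ≤ n) :
    (check_furedi_lower_bound n k p lb = true ↔
      pvV k (p - 1).toNat (n - (p - 1)) ≤ k * lb) := by
  have hcast : (((p - 1).toNat : Int)) = p - 1 := by omega
  have hMn : pvM k (p - 1).toNat n = some (pvV k (p - 1).toNat (n - (p - 1))) := by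
    have := pvM_eq_some_pvV k (p - 1).toNat (n - (p - 1)) (by omega) (by omega)
    rw [hcast] at this
    rw [show p - 1 + (n - (p - 1)) = n by ring] at this
    exact this
  rw [portA_eq_true_iff]
  constructor
  · rintro ⟨c, hc, hsum, hw⟩
    obtain ⟨hlen, -, hbd⟩ := (mem_pvCombs n (p - 1).toNat 1 c).1 hc
    have h1 : ∀ x ∈ c, 1 ≤ x := fun x hx => (hbd x hx).1
    obtain ⟨v, hv, hvle⟩ := pvM_reach k c h1
    rw [hlen, hsum, hMn] at hv
    have hBW : (c.map (pvWeightB k)).sum = (c.map (pvWeightA k)).sum := by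
      congr 1
      exact List.map_congr_left (fun x _ => pvWeight_eq k x)
    have := Option.some.inj hv
    omega
  · intro hfit
    obtain ⟨c, hlen, h1, hsum, hw⟩ := pvM_realize k (p - 1).toNat n _ hMn
    have hperm : (List.insertionSort (· ≤ ·) c).Perm c := List.perm_insertionSort (· ≤ ·) c
    have hpw : List.Pairwise (· ≤ ·) (List.insertionSort (· ≤ ·) c) :=
      List.pairwise_insertionSort (· ≤ ·) c
    have h1' : ∀ x ∈ List.insertionSort (· ≤ ·) c, 1 ≤ x :=
      fun x hx => h1 x (hperm.mem_iff.1 hx)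
    have hsum' : (List.insertionSort (· ≤ ·) c).sum = n := by
      rw [hperm.sum_eq, hsum]
    have hmem : List.insertionSort (· ≤ ·) c ∈ pvCombs n (p - 1).toNat 1 := by
      rw [mem_pvCombs]
      refine ⟨by rw [hperm.length_eq, hlen], hpw, ?_⟩
      intro x hx
      have := list_elem_le_sum h1' x hx
      rw [hsum'] at this
      exact ⟨h1' x hx, this⟩
    refine ⟨List.insertionSort (· ≤ ·) c, hmem, hsum', ?_⟩
    have hWperm : ((List.insertionSort (· ≤ ·) c).map (pvWeightA k)).sum
        = (c.map (pvWeightA k)).sum := (hperm.map (pvWeightA k)).sum_eq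
    have hBW : (c.map (pvWeightB k)).sum = (c.map (pvWeightA k)).sum := by
      congr 1
      exact List.map_congr_left (fun x _ => pvWeight_eq k x)
    omega

-- the W table reads back the weight function
theorem pvWTable_get (k E : Int) :
    ∀ x : Int, 0 ≤ x → x ≤ E + 1 → PySem.List.pyGetD (pvWTable k E) x 0 = pvWeightB k x := by
  intro x h0 h1
  unfold pvWTable
  exact PySem.List.pyGetD_map_pyRange_of_nonneg _ (E + 2) x 0 h0 (by omega)

-- the first row reads back the one-part minima
theorem pvRowOne_get (k E : Int) (hE : 0 ≤ E) :
    ∀ e : Int, 0 ≤ e → e ≤ E →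
      PySem.List.pyGetD (pvRowOne E (pvWTable k E)) e 0 = pvV k 1 e := by
  intro e h0 h1
  unfold pvRowOne
  rw [PySem.List.pyGetD_map_pyRange_of_nonneg _ (E + 1) e 0 h0 (by omega)]
  rw [pvWTable_get k E (e + 1) (by omega) (by omega)]
  rw [pvV_one k e h0]

theorem main_eq (n k p lb : Int) (hp : 1 ≤ p) :
    check_furedi_lower_bound n k p lb = check_furedi_lower_bound_alt n k p lb := by
  by_cases hp1 : p = 1
  · subst hp1
    simp [check_furedi_lower_bound, check_furedi_lower_bound_alt, pvCombs, eq_comm]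
    all_goals rfl
  · have hm : 1 ≤ p - 1 := by omega
    by_cases hsmall : n < p - 1
    · -- no combination can sum to n: both sides false
      have hA : check_furedi_lower_bound n k p lb = false := by
        rw [← Bool.not_eq_true, portA_eq_true_iff]
        rintro ⟨c, hc, hsum, -⟩
        obtain ⟨hlen, -, hbd⟩ := (mem_pvCombs n (p - 1).toNat 1 c).1 hc
        have h1 : ∀ x ∈ c, 1 ≤ x := fun x hx => (hbd x hx).1
        have := list_length_le_sum h1
        rw [hlen, hsum] at this
        omega
      have hB : check_furedi_lower_bound_alt n k p lb = false := by
        unfold check_furedi_lower_bound_alt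
        rw [if_neg (by omega), if_pos (by omega)]
      rw [hA, hB]
    · -- 1 ≤ p - 1 ≤ n: DP over the excess E = n - (p - 1)
      have hE : 0 ≤ n - (p - 1) := by omega
      have hBif : check_furedi_lower_bound_alt n k p lb =
          (if PySem.List.pyGetD (pvRowOne (n - (p - 1)) (pvWTable k (n - (p - 1))))
              (n - (p - 1)) 0 ≤ k * lb then true
           else
             pvLoop (n - (p - 1)) (k * lb) (min (p - 1) (n - (p - 1)))
               (pvWTable k (n - (p - 1)))
               (min (p - 1) (n - (p - 1)) - 1).toNat 2
               (pvRowOne (n - (p - 1)) (pvWTable k (n - (p - 1))))) := by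
        unfold check_furedi_lower_bound_alt
        rw [if_neg (by omega), if_neg (by omega)]
      have hB_iff : check_furedi_lower_bound_alt n k p lb = true ↔
          (pvV k 1 (n - (p - 1)) ≤ k * lb ∨
            ∃ i : Int, 2 ≤ i ∧ i ≤ min (p - 1) (n - (p - 1)) ∧
              pvV k i.toNat (n - (p - 1)) ≤ k * lb) := by
        rw [hBif, pvRowOne_get k (n - (p - 1)) hE (n - (p - 1)) hE (le_refl _)]
        by_cases hrow1 : pvV k 1 (n - (p - 1)) ≤ k * lb
        · rw [if_pos hrow1]
          simp [hrow1]
        · rw [if_neg hrow1]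
          by_cases hjm : 2 ≤ min (p - 1) (n - (p - 1))
          · rw [pvLoop_spec k (n - (p - 1)) (k * lb) (min (p - 1) (n - (p - 1)))
              (pvWTable k (n - (p - 1))) hE (pvWTable_get k (n - (p - 1)))
              (min (p - 1) (n - (p - 1)) - 1).toNat 2
              (pvRowOne (n - (p - 1)) (pvWTable k (n - (p - 1))))
              (le_refl 2) (by omega)
              (by
                intro e h0 h1
                rw [pvRowOne_get k (n - (p - 1)) hE e h0 h1]
                norm_num)]
            constructor
            · rintro ⟨i, h1, h2, h3⟩
              exact Or.inr ⟨i, h1, h2, h3⟩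
            · rintro (h | ⟨i, h1, h2, h3⟩)
              · exact absurd h hrow1
              · exact ⟨i, h1, h2, h3⟩
          · have hfuel : (min (p - 1) (n - (p - 1)) - 1).toNat = 0 := by omega
            rw [hfuel]
            simp only [pvLoop]
            constructor
            · intro h; cases h
            · rintro (h | ⟨i, h1, h2, -⟩)
              · exact absurd h hrow1
              · exfalso; omega
      rw [Bool.eq_iff_iff, hB_iff, portA_iff_V n k p lb hm (by omega)]
      exact pvV_bridge k (p - 1) (n - (p - 1)) (k * lb) hm hE

-- ===== VERDICT (by name: the statement is the Claim_ definition above) =====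
theorem check_furedi_lower_bound_spec : Claim_equal_check_furedi_lower_bound := by
  intro n k p lb _ hpre
  show check_furedi_lower_bound n k p lb = check_furedi_lower_bound_alt n k p lb
  exact main_eq n k p lb hpre.1
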